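-- pv_equiv track=rewrite | github.com/kylebegovich/ProjectEuler | Python/Solved/Page3+/Problem816.py | get_s_nums
-- ===== SOURCE A (Python) =====
-- START = 290797
--
-- MOD = 50515093
--
-- def step(n):
--     return (n ** 2) % MOD
--
-- def get_s_nums(count):
--     curr = START
--     s_nums = [START]
--     for i in range(count):
--         next = step(curr)
--         s_nums.append(next)
--         curr = next
--     return s_nums
-- ===== SOURCE B (Python) =====
-- START = 290797
-- MOD = 50515093
--
-- # MOD = 5807 * 8699 (both prime) and gcd(START, MOD) = 1, so START**LAM % MOD == 1
-- # for LAM = lcm(5807 - 1, 8699 - 1), the Carmichael function of MOD.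
-- LAM = 25250294
--
--
-- def get_s_nums(count):
--     # Closed form: the k-th element is START**(2**k) % MOD (squaring mod MOD k times
--     # starting from START is exactly that power).  Stage 1 builds the exponents
--     # 2**k reduced mod LAM; stage 2 computes every element independently from START
--     # by modular exponentiation -- no element is derived from the previous element.
--     exps = [1]
--     e = 1
--     for _ in range(max(count, 0)):
--         e = 2 * e % LAM
--         exps.append(e)
--     return [pow(START, e, MOD) for e in exps]
-- ===== Notes on version B (the rewrite author's own statement) =====
-- stated objective: alternative
-- what changed: Replaces the squaring recurrence on the values by a per-index closed form: element k is START^(2^k) mod MOD, computed independently by modular exponentiation from a staged list of exponents 2^k reduced mod the Carmichael value LAM of MOD (valid since gcd(START,MOD)=1 and START^LAM = 1 mod MOD), instead of squaring the previous element.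
import Mathlib
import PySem

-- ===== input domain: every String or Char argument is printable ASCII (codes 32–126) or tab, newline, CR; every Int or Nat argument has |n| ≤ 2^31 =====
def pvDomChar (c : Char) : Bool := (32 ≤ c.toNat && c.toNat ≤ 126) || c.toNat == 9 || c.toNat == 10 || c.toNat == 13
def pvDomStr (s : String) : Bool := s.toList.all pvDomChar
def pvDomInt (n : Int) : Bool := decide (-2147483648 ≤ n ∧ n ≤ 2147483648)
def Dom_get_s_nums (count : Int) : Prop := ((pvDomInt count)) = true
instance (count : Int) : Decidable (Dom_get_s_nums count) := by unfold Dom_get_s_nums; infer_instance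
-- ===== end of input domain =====

-- B replaces A's squaring recurrence on the values by a per-index closed form: element k is
-- START^(2^k) mod MOD, computed independently by modular exponentiation from a staged list of
-- exponents 2^k reduced mod the Carmichael value of MOD; alternative, not faster.

def pvSTART : Int := 290797
def pvMOD : Int := 50515093

-- ===== PORT A =====
def pvStep (n : Int) : Int := PySem.Int.mod (n ^ 2) pvMOD

def get_s_nums (count : Int) : List Int :=
  let st := (PySem.List.pyRange 0 count 1).foldl
    (fun (st : Int × List Int) _ =>
      let next := pvStep st.1
      (next, st.2 ++ [next]))
    (pvSTART, [pvSTART])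
  st.2

-- ===== PORT B =====
def pvLAM : Nat := 25250294

-- e = 2 * e % LAM
def pvExpStep (e : Int) : Int := PySem.Int.mod (2 * e) (pvLAM : Int)

-- hand port of Python's three-argument pow(b, e, m) by binary exponentiation
-- (exact for a nonnegative exponent and a positive modulus, which is how Source B calls it);
-- structural recursion on a fuel that bounds the halvings of e.
def pvPowModFuel : Nat → Int → Nat → Int → Int
  | 0, _, _, m => PySem.Int.mod 1 m
  | fuel+1, b, e, m =>
    if e = 0 then PySem.Int.mod 1 m
    else
      let h := pvPowModFuel fuel b (e / 2) m
      let h2 := PySem.Int.mod (h * h) m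
      if e % 2 = 1 then PySem.Int.mod (h2 * b) m else h2

def pvPowMod (b : Int) (e : Nat) (m : Int) : Int := pvPowModFuel (e + 1) b e m

-- stage 1: the exponent list; stage 2: pow(START, e, MOD) for each exponent
-- (.toNat is exact here: the exponents are remainders mod LAM, hence nonnegative)
def get_s_nums_alt (count : Int) : List Int :=
  let st := (PySem.List.pyRange 0 (max count 0) 1).foldl
    (fun (st : Int × List Int) _ =>
      let e := pvExpStep st.1
      (e, st.2 ++ [e]))
    (1, [1])
  st.2.map (fun e => pvPowMod pvSTART e.toNat pvMOD)

-- ===== PRECONDITION & SPEC =====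
def Spec_get_s_nums (count : Int) (out : List Int) : Prop := out = get_s_nums_alt count
instance (count : Int) (out : List Int) : Decidable (Spec_get_s_nums count out) := by unfold Spec_get_s_nums; infer_instance

-- ===== CLAIM (what is proved, stated in full; the proofs are below) =====
def Claim_equal_get_s_nums : Prop := ∀ (count : Int), Dom_get_s_nums count → Spec_get_s_nums count (get_s_nums count)

-- ===== LEMMAS AND PROOFS =====

-- A's iterated step and B's iterated exponent step
def pvIter : Nat → Int
  | 0 => pvSTART
  | k+1 => pvStep (pvIter k)

def pvExpIter : Nat → Int
  | 0 => 1
  | k+1 => pvExpStep (pvExpIter k)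

theorem pv_pow_emod (a n : Int) (b : Nat) : (a % n) ^ b % n = a ^ b % n :=
  (Int.ModEq.pow b (Int.emod_emod_of_dvd a dvd_rfl) : _)

-- correctness of the hand-ported modular exponentiation
theorem pvPowModFuel_eq (fuel : Nat) : ∀ (e : Nat), e < fuel → ∀ (b m : Int), 0 < m →
    pvPowModFuel fuel b e m = PySem.Int.mod (b ^ e) m := by
  induction fuel with
  | zero => intro e he; omega
  | succ fuel ih =>
    intro e he b m hm
    by_cases h0 : e = 0
    · subst h0; simp [pvPowModFuel]
    · have hlt : e / 2 < fuel := by omega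
      have hrec := ih (e / 2) hlt b m hm
      have hall : ∀ x : Int, PySem.Int.mod x m = x % m := fun _ => PySem.Int.mod_eq_emod_of_pos hm
      simp only [pvPowModFuel, if_neg h0, hrec, hall]
      have base : b ^ (e / 2) % m ≡ b ^ (e / 2) [ZMOD m] := Int.emod_emod_of_dvd _ dvd_rfl
      have hmul : b ^ (e / 2) % m * (b ^ (e / 2) % m) ≡ b ^ (e / 2) * b ^ (e / 2) [ZMOD m] :=
        base.mul base
      by_cases hpar : e % 2 = 1
      · rw [if_pos hpar]
        have t0 : b ^ (e / 2) % m * (b ^ (e / 2) % m) % m ≡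
            b ^ (e / 2) % m * (b ^ (e / 2) % m) [ZMOD m] := Int.emod_emod_of_dvd _ dvd_rfl
        have t2 := Int.ModEq.mul_right b (t0.trans hmul)
        have he2 : b ^ (e / 2) * b ^ (e / 2) * b = b ^ e := by
          rw [← pow_add, ← pow_succ]; congr 1; omega
        rw [he2] at t2
        exact t2
      · rw [if_neg hpar]
        have he2 : b ^ (e / 2) * b ^ (e / 2) = b ^ e := by
          rw [← pow_add]; congr 1; omega
        rw [he2] at hmul
        exact hmul

theorem pvPowMod_eq (b : Int) (e : Nat) (m : Int) (hm : 0 < m) :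
    pvPowMod b e m = PySem.Int.mod (b ^ e) m :=
  pvPowModFuel_eq (e + 1) e (Nat.lt_succ_self e) b m hm

theorem pvMOD_pos : (0:Int) < pvMOD := by norm_num [pvMOD]

-- closed form of A's iterate: the k-th term is START^(2^k) mod MOD
theorem pvIter_closed (k : Nat) : pvIter k = pvSTART ^ (2 ^ k) % pvMOD := by
  induction k with
  | zero => decide
  | succ k ih =>
    show pvStep (pvIter k) = _
    rw [pvStep, PySem.Int.mod_eq_emod_of_pos pvMOD_pos, ih, pv_pow_emod, ← pow_mul]
    congr 2

-- closed form of B's exponent iterate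
theorem pvExpIter_closed (k : Nat) : pvExpIter k = ((2 ^ k % pvLAM : Nat) : Int) := by
  induction k with
  | zero => decide
  | succ k ih =>
    have hlam : (0:Int) < (pvLAM : Int) := by norm_num [pvLAM]
    show pvExpStep (pvExpIter k) = _
    rw [pvExpStep, PySem.Int.mod_eq_emod_of_pos hlam, ih]
    push_cast
    rw [Int.mul_emod, Int.emod_emod_of_dvd _ dvd_rfl, ← Int.mul_emod, ← pow_succ']

-- START^LAM ≡ 1 (mod MOD): evaluated through the verified modular exponentiation
theorem pvFermat : pvSTART ^ pvLAM % pvMOD = 1 := by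
  have h := pvPowMod_eq pvSTART pvLAM pvMOD pvMOD_pos
  rw [PySem.Int.mod_eq_emod_of_pos pvMOD_pos] at h
  rw [← h]
  decide

-- the exponent 2^k may be reduced mod LAM
theorem pvReduce (k : Nat) : pvSTART ^ (2 ^ k % pvLAM) % pvMOD = pvSTART ^ (2 ^ k) % pvMOD := by
  conv_rhs => rw [← Nat.div_add_mod (2 ^ k) pvLAM]
  rw [pow_add, pow_mul, Int.mul_emod, ← pv_pow_emod (pvSTART ^ pvLAM), pvFermat]
  have h1 : (1 : Int) % pvMOD = 1 := by decide
  rw [one_pow, h1, one_mul, Int.emod_emod_of_dvd _ dvd_rfl]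

-- B's element for the k-th exponent equals A's k-th iterate
theorem pvBelem (k : Nat) : pvPowMod pvSTART (2 ^ k % pvLAM) pvMOD = pvIter k := by
  rw [pvPowMod_eq _ _ _ pvMOD_pos, PySem.Int.mod_eq_emod_of_pos pvMOD_pos, pvReduce,
    pvIter_closed]

-- the append-loop of either port produces the list of iterates of its step function
theorem pvFold (f : Int → Int) (g : Nat → Int) (hg : ∀ k, g (k + 1) = f (g k))
    (l : List Int) : ∀ (k : Nat) (c : Int) (acc : List Int), c = g k →
    (l.foldl
      (fun (st : Int × List Int) _ =>
        let next := f st.1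
        (next, st.2 ++ [next]))
      (c, acc)).2
      = acc ++ (List.range l.length).map (fun i => g (k + 1 + i)) := by
  induction l with
  | nil => intro k c acc _; simp
  | cons x xs ih =>
    intro k c acc hc
    simp only [List.foldl_cons, List.length_cons]
    rw [ih (k + 1) (f c) (acc ++ [f c]) (by rw [hc, ← hg])]
    rw [hc, ← hg, List.range_succ_eq_map, List.map_cons, List.map_map, List.append_assoc,
      List.singleton_append]
    congr 2
    apply List.map_congr_left
    intro i _
    simp only [Function.comp]
    congr 1
    omega

-- each loop's output, assembled: the first count.toNat + 1 iterates
theorem pvLoopList (f : Int → Int) (g : Nat → Int) (hg : ∀ k, g (k + 1) = f (g k))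
    (b : Int) :
    ((PySem.List.pyRange 0 b 1).foldl
      (fun (st : Int × List Int) _ =>
        let next := f st.1
        (next, st.2 ++ [next]))
      (g 0, [g 0])).2
      = (List.range (b.toNat + 1)).map g := by
  rw [pvFold f g hg _ 0 (g 0) [g 0] rfl]
  have hlen : (PySem.List.pyRange 0 b 1).length = b.toNat := by
    rw [PySem.List.pyRange_one]; simp
  rw [hlen, List.range_succ_eq_map, List.map_cons, List.map_map, List.singleton_append]
  congr 1
  apply List.map_congr_left
  intro i _
  simp only [Function.comp, Nat.succ_eq_add_one]
  congr 1
  omega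

-- ===== VERDICT (by name: the statement is the Claim_ definition above) =====
theorem get_s_nums_spec : Claim_equal_get_s_nums := by
  intro count _
  unfold Spec_get_s_nums
  have hmax : (max count 0).toNat = count.toNat := by
    rcases le_total count 0 with hc | hc
    · rw [max_eq_right hc]; omega
    · rw [max_eq_left hc]
  have hA : get_s_nums count = (List.range (count.toNat + 1)).map pvIter := by
    have h := pvLoopList pvStep pvIter (fun _ => rfl) (max count 0)
    rw [hmax] at h
    rcases le_total count 0 with hc | hc
    · rw [max_eq_right hc] at h
      have hr : PySem.List.pyRange 0 count 1 = PySem.List.pyRange 0 0 1 := by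
        rw [PySem.List.pyRange_one, PySem.List.pyRange_one]
        have ht : (count - 0).toNat = ((0:Int) - 0).toNat := by omega
        rw [ht]
      simp only [get_s_nums]
      rw [hr]
      exact h
    · rw [max_eq_left hc] at h
      exact h
  have h := pvLoopList pvExpStep pvExpIter (fun _ => rfl) (max count 0)
  rw [hmax] at h
  have hB : get_s_nums_alt count
      = ((List.range (count.toNat + 1)).map pvExpIter).map
          (fun e => pvPowMod pvSTART e.toNat pvMOD) :=
    by exact congrArg (List.map (fun e : Int => pvPowMod pvSTART e.toNat pvMOD)) h
  rw [hA, hB, List.map_map]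
  apply List.map_congr_left
  intro j _
  simp only [Function.comp]
  rw [pvExpIter_closed j, Int.toNat_natCast]
  exact (pvBelem j).symm
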